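-- pv_equiv track=rewrite | github.com/DirectAI/simple-data-free-model-server | directai_fastapi/modeling/tensor_utils.py | squish_labels
-- ===== SOURCE A (Python) =====
-- def squish_labels(
--     labels: list[str],
--     inc_sub_labels_dict: dict[str, list[str]],
--     exc_sub_labels_dict: dict[str, list[str]],
-- ) -> tuple[list[str], dict[str, int]]:
--     # build one list of labels to encode, without duplicates
--     # and lists / dicts containing the indices of each label
--     # and the indices of each label's sub-labels
--     all_labels_to_inds: dict[str, int] = {}
--     all_labels = []
--
--     for label in labels:
--         inc_subs = inc_sub_labels_dict.get(label)
--         if inc_subs is not None: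
--             for inc_sub in inc_subs:
--                 if inc_sub not in all_labels_to_inds:
--                     all_labels_to_inds[inc_sub] = len(all_labels_to_inds)
--                     all_labels.append(inc_sub)
--
--         exc_subs = exc_sub_labels_dict.get(label)
--         if exc_subs is not None:
--             for exc_sub in exc_subs:
--                 if exc_sub not in all_labels_to_inds:
--                     all_labels_to_inds[exc_sub] = len(all_labels_to_inds)
--                     all_labels.append(exc_sub)
--
--     return all_labels, all_labels_to_inds
-- ===== SOURCE B (Python) =====
-- def squish_labels(
--     labels: list[str],
--     inc_sub_labels_dict: dict[str, list[str]],
--     exc_sub_labels_dict: dict[str, list[str]],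
-- ) -> tuple[list[str], dict[str, int]]:
--     # phase 1: collect every sub-label, inc before exc, in label order
--     stream: list[str] = []
--     for label in labels:
--         stream.extend(inc_sub_labels_dict.get(label) or [])
--         stream.extend(exc_sub_labels_dict.get(label) or [])
--     # phase 2: dedup keeping first-seen order
--     all_labels = list(dict.fromkeys(stream))
--     # phase 3: index map
--     all_labels_to_inds = {v: i for i, v in enumerate(all_labels)}
--     return all_labels, all_labels_to_inds
-- ===== Notes on version B (the rewrite author's own statement) =====
-- stated objective: simpler
-- what changed: Replaced A's single interleaved pass that maintains a dict and list together (checking membership and assigning indices while walking nested loops) by a three-phase pipeline: flatten all sub-labels into one stream, dedup it with dict.fromkeys, then build the index map by enumerate.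
import Mathlib
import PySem

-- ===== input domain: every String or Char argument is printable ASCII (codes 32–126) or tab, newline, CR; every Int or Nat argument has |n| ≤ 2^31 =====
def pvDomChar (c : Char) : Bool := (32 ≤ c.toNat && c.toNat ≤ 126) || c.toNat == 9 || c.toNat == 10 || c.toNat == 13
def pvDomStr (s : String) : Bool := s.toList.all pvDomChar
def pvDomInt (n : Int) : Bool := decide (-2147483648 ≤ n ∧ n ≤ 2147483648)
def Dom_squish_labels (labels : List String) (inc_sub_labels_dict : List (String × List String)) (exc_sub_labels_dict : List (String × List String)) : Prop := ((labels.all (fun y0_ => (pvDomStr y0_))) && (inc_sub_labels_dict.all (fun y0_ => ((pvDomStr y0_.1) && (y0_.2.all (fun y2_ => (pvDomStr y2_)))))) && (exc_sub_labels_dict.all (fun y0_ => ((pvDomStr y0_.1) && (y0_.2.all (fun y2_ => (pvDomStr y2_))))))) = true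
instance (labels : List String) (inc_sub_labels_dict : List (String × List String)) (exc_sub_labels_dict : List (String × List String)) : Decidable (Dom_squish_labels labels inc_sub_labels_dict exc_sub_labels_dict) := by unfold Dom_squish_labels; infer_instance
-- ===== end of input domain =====

-- B replaces A's single interleaved dedup-and-index pass by a three-phase pipeline
-- (flatten, dedup via dict.fromkeys, index via enumerate); objective: simpler.

-- ===== PORT A =====
def squish_labels (labels : List String) (inc_sub_labels_dict : List (String × List String)) (exc_sub_labels_dict : List (String × List String)) : List String × (List (String × Int)) :=
  let inc_d : PySem.Dict String (List String) := PySem.Dict.ofList inc_sub_labels_dict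
  let exc_d : PySem.Dict String (List String) := PySem.Dict.ofList exc_sub_labels_dict
  let st := labels.foldl (fun (st : PySem.Dict String Int × List String) label =>
    let st :=
      match inc_d.get? label with
      | some inc_subs =>
          inc_subs.foldl (fun st inc_sub =>
            if st.1.contains inc_sub then st
            else (st.1.insert inc_sub (st.1.size : Int), st.2 ++ [inc_sub])) st
      | none => st
    match exc_d.get? label with
    | some exc_subs =>
        exc_subs.foldl (fun st exc_sub =>
          if st.1.contains exc_sub then st
          else (st.1.insert exc_sub (st.1.size : Int), st.2 ++ [exc_sub])) st
    | none => st) (PySem.Dict.empty, [])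
  (st.2, st.1.items)

-- ===== PORT B =====
def squish_labels_alt (labels : List String) (inc_sub_labels_dict : List (String × List String)) (exc_sub_labels_dict : List (String × List String)) : List String × (List (String × Int)) :=
  let inc_d : PySem.Dict String (List String) := PySem.Dict.ofList inc_sub_labels_dict
  let exc_d : PySem.Dict String (List String) := PySem.Dict.ofList exc_sub_labels_dict
  -- phase 1: stream of all sub-labels
  let stream := labels.foldl (fun acc label =>
    acc ++ ((inc_d.get? label).getD []) ++ ((exc_d.get? label).getD [])) []
  -- phase 2: dedup keeping first-seen order (dict.fromkeys)
  let all_labels := PySem.List.dedup stream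
  -- phase 3: index map {v: i for i, v in enumerate(all_labels)}
  (all_labels, (PySem.List.enumerate all_labels).map (fun p => (p.2, p.1)))

-- ===== PRECONDITION & SPEC =====
def Spec_squish_labels (labels : List String) (inc_sub_labels_dict : List (String × List String)) (exc_sub_labels_dict : List (String × List String)) (out : List String × (List (String × Int))) : Prop := out = squish_labels_alt labels inc_sub_labels_dict exc_sub_labels_dict
instance (labels : List String) (inc_sub_labels_dict : List (String × List String)) (exc_sub_labels_dict : List (String × List String)) (out : List String × (List (String × Int))) : Decidable (Spec_squish_labels labels inc_sub_labels_dict exc_sub_labels_dict out) := by unfold Spec_squish_labels; infer_instance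

-- ===== CLAIM (what is proved, stated in full; the proofs are below) =====
def Claim_equal_squish_labels : Prop := ∀ (labels : List String) (inc_sub_labels_dict : List (String × List String)) (exc_sub_labels_dict : List (String × List String)), Dom_squish_labels labels inc_sub_labels_dict exc_sub_labels_dict → Spec_squish_labels labels inc_sub_labels_dict exc_sub_labels_dict (squish_labels labels inc_sub_labels_dict exc_sub_labels_dict)

-- ===== LEMMAS AND PROOFS =====

-- A's loop body, as it acts on one sub-label
def pvStepA (st : PySem.Dict String Int × List String) (s : String) : PySem.Dict String Int × List String :=
  if st.1.contains s then st
  else (st.1.insert s (st.1.size : Int), st.2 ++ [s])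

-- the dict A maintains, expressed from the list it maintains
def pvDOf (ls : List String) : PySem.Dict String Int :=
  PySem.Dict.mk ((PySem.List.enumerate ls).map (fun p => (p.2, p.1)))

lemma pvDOf_keys (ls : List String) : (pvDOf ls).keys = ls := by
  simp [pvDOf, PySem.Dict.keys, List.map_map, Function.comp_def]

lemma pvDOf_contains (ls : List String) (s : String) :
    (pvDOf ls).contains s = decide (s ∈ ls) := by
  rw [PySem.Dict.contains_eq_decide_mem_keys, pvDOf_keys]

lemma pvDOf_size (ls : List String) : (pvDOf ls).size = ls.length := by
  simp [pvDOf, PySem.Dict.size, PySem.List.length_enumerate]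

lemma pvStepA_eq (ls : List String) (s : String) :
    pvStepA (pvDOf ls, ls) s = (pvDOf (PySem.Set.add ls s), PySem.Set.add ls s) := by
  by_cases h : s ∈ ls
  · simp [pvStepA, pvDOf_contains, h, PySem.Set.add_of_mem]
  · have hc : (pvDOf ls).contains s = false := by simp [pvDOf_contains, h]
    simp only [pvStepA, hc, Bool.false_eq_true, if_false, PySem.Set.add_of_not_mem h]
    refine Prod.ext ?_ rfl
    apply PySem.Dict.ext
    rw [PySem.Dict.items_insert_of_not_contains _ _ hc, pvDOf_size]
    simp [pvDOf, PySem.List.enumerate_append]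

lemma pvFoldA (xs : List String) (ls : List String) :
    xs.foldl pvStepA (pvDOf ls, ls)
      = (pvDOf (xs.foldl PySem.Set.add ls), xs.foldl PySem.Set.add ls) := by
  induction xs generalizing ls with
  | nil => rfl
  | cons x xs ih => rw [List.foldl_cons, pvStepA_eq, ih, List.foldl_cons]

-- ===== VERDICT (by name: the statement is the Claim_ definition above) =====
theorem squish_labels_spec : Claim_equal_squish_labels := by
  intro labels inc exc _
  unfold Spec_squish_labels squish_labels squish_labels_alt
  simp only []
  set inc_d : PySem.Dict String (List String) := PySem.Dict.ofList inc
  set exc_d : PySem.Dict String (List String) := PySem.Dict.ofList exc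
  -- the per-label chunk of sub-labels
  have hbody : ∀ (st : PySem.Dict String Int × List String) (label : String),
      (let st' :=
        match inc_d.get? label with
        | some inc_subs =>
            inc_subs.foldl (fun st inc_sub =>
              if st.1.contains inc_sub then st
              else (st.1.insert inc_sub (st.1.size : Int), st.2 ++ [inc_sub])) st
        | none => st
       match exc_d.get? label with
       | some exc_subs =>
           exc_subs.foldl (fun st exc_sub =>
             if st.1.contains exc_sub then st
             else (st.1.insert exc_sub (st.1.size : Int), st.2 ++ [exc_sub])) st'
       | none => st')
      = ((inc_d.get? label).getD [] ++ (exc_d.get? label).getD []).foldl pvStepA st := by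
    intro st label
    rw [List.foldl_append]
    cases inc_d.get? label <;> cases exc_d.get? label <;> rfl
  have hA : labels.foldl (fun (st : PySem.Dict String Int × List String) label =>
        let st' :=
          match inc_d.get? label with
          | some inc_subs =>
              inc_subs.foldl (fun st inc_sub =>
                if st.1.contains inc_sub then st
                else (st.1.insert inc_sub (st.1.size : Int), st.2 ++ [inc_sub])) st
          | none => st
        match exc_d.get? label with
        | some exc_subs =>
            exc_subs.foldl (fun st exc_sub =>
              if st.1.contains exc_sub then st
              else (st.1.insert exc_sub (st.1.size : Int), st.2 ++ [exc_sub])) st'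
        | none => st') (PySem.Dict.empty, [])
      = (labels.flatMap (fun label => (inc_d.get? label).getD [] ++ (exc_d.get? label).getD [])).foldl
          pvStepA (PySem.Dict.empty, []) := by
    rw [List.foldl_flatMap]
    exact PySem.List.foldl_congr_mem _ _ _ _ (fun st label _ => hbody st label)
  rw [hA]
  have hstream : labels.foldl (fun acc label =>
        acc ++ ((inc_d.get? label).getD []) ++ ((exc_d.get? label).getD [])) []
      = labels.flatMap (fun label => (inc_d.get? label).getD [] ++ (exc_d.get? label).getD []) := by
    rw [PySem.List.foldl_congr_mem labels
          (fun acc label => acc ++ (inc_d.get? label).getD [] ++ (exc_d.get? label).getD [])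
          (fun acc label => acc ++ ((inc_d.get? label).getD [] ++ (exc_d.get? label).getD []))
          [] (fun acc label _ => List.append_assoc _ _ _),
        PySem.List.foldl_append_eq_flatMap, List.nil_append]
  rw [hstream]
  have h0 : ((PySem.Dict.empty : PySem.Dict String Int), ([] : List String)) = (pvDOf [], []) := rfl
  rw [h0, pvFoldA]
  rw [PySem.List.dedup_eq_ofList, PySem.Set.ofList_eq_foldl]
  rfl
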